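-- pv_equiv track=rewrite | github.com/Vak-kas/cryp | chap01/affine.py | makeDisk
-- ===== SOURCE A (Python) =====
-- def makeDisk(k1, k2):
--
--     enc_disk = {}
--     dec_disk = {}
--     for i in range(26):
--         enc_i = (i*k1+k2)%26
--         enc_ascii = enc_i + 65
--         enc_disk[chr(i+65)] = chr(enc_ascii);
--         dec_disk[chr(enc_ascii)] = chr(i+65)
--
--
--     return enc_disk, dec_disk
-- ===== SOURCE B (Python) =====
-- def makeDisk(k1, k2):
--     # Affine disk via string machinery: rotate the alphabet by k2, then read it with
--     # stride k1 out of a replicated copy; zip plains with ciphers to form both dicts.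
--     base = "ABCDEFGHIJKLMNOPQRSTUVWXYZ"
--     m = k1 % 26
--     r = k2 % 26
--     shifted = base[r:] + base[:r]
--     cipher = shifted[0] * 26 if m == 0 else (shifted * m)[::m]
--     enc_disk = dict(zip(base, cipher))
--     dec_disk = dict(zip(cipher, base))
--     return enc_disk, dec_disk
-- ===== Notes on version B (the rewrite author's own statement) =====
-- stated objective: alternative
-- what changed: B builds no per-letter arithmetic loop at all: it rotates the alphabet string by k2 % 26, reads the cipher sequence out of that string replicated k1 % 26 times with a stride-(k1 % 26) slice ((shifted*m)[::m]), and forms both dicts by zipping plaintext and cipher strings (dict(zip(...))), whereas A fills both dicts in one indexed loop computing (i*k1+k2) % 26 per letter.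
import Mathlib
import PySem

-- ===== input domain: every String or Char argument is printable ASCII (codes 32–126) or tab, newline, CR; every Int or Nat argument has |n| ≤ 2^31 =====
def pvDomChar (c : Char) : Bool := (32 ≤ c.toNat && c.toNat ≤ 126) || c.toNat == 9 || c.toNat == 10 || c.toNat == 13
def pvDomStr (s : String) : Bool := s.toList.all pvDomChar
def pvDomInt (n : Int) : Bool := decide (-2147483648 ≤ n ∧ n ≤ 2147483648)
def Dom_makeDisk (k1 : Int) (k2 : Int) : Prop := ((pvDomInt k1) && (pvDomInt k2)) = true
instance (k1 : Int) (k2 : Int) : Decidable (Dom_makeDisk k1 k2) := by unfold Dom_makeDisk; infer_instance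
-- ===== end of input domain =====

-- B replaces the per-letter arithmetic loop by string machinery: rotate the alphabet by k2,
-- read it with stride k1 out of a replicated copy, and zip plains with ciphers into the two
-- dicts (objective: alternative).

-- Python's chr(n); exact for 0 ≤ n < 0xD800 (every use here is 65..90)
def pyChr (n : Int) : String := String.ofList [Char.ofNat n.toNat]

-- ===== PORT A =====
def makeDisk (k1 : Int) (k2 : Int) : (List (String × String)) × (List (String × String)) :=
  let st := (PySem.List.pyRange 0 26 1).foldl
    (fun (st : PySem.Dict String String × PySem.Dict String String) i =>
      let enc_i := PySem.Int.mod (i * k1 + k2) 26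
      let enc_ascii := enc_i + 65
      (st.1.insert (pyChr (i + 65)) (pyChr enc_ascii),
       st.2.insert (pyChr enc_ascii) (pyChr (i + 65))))
    (PySem.Dict.empty, PySem.Dict.empty)
  (st.1.items, st.2.items)

-- ===== PORT B =====
-- strings are handled as their code-point lists; zip over two strings yields pairs of
-- 1-character strings, hence the final map to String.ofList singletons.
def makeDisk_alt (k1 : Int) (k2 : Int) : (List (String × String)) × (List (String × String)) :=
  let base : List Char := "ABCDEFGHIJKLMNOPQRSTUVWXYZ".toList
  let m := PySem.Int.mod k1 26
  let r := PySem.Int.mod k2 26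
  let shifted := PySem.List.slice base (some r) none ++ PySem.List.slice base none (some r)
  -- shifted has 26 characters, so shifted[0] is defined (pyGet? is some here);
  -- in the else-branch m ≠ 0, so slice? with step m is some: getD [] is never the default
  let cipher := if m = 0 then PySem.List.pyRepeat (PySem.List.pyGet? shifted 0).toList 26
                else (PySem.List.slice? (PySem.List.pyRepeat shifted m) none none m).getD []
  let encPairs := (base.zip cipher).map (fun pc => (String.ofList [pc.1], String.ofList [pc.2]))
  let decPairs := (cipher.zip base).map (fun pc => (String.ofList [pc.1], String.ofList [pc.2]))
  ((PySem.Dict.ofList encPairs).items, (PySem.Dict.ofList decPairs).items)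

-- ===== PRECONDITION & SPEC =====
def Spec_makeDisk (k1 : Int) (k2 : Int) (out : (List (String × String)) × (List (String × String))) : Prop := out = makeDisk_alt k1 k2
instance (k1 : Int) (k2 : Int) (out : (List (String × String)) × (List (String × String))) : Decidable (Spec_makeDisk k1 k2 out) := by unfold Spec_makeDisk; infer_instance

-- ===== CLAIM (what is proved, stated in full; the proofs are below) =====
def Claim_equal_makeDisk : Prop := ∀ (k1 : Int) (k2 : Int), Dom_makeDisk k1 k2 → Spec_makeDisk k1 k2 (makeDisk k1 k2)

-- ===== LEMMAS AND PROOFS =====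

-- B's cipher-building step as a function of the rotated alphabet (same body as the port's `cipher`)
def algoCore {α : Type} (xs : List α) (m : Int) : List α :=
  if m = 0 then PySem.List.pyRepeat (PySem.List.pyGet? xs 0).toList 26
  else (PySem.List.slice? (PySem.List.pyRepeat xs m) none none m).getD []

-- the three primitives of algoCore commute with List.map
lemma pyRepeat_map {α β : Type} (f : α → β) (xs : List α) (n : Int) :
    PySem.List.pyRepeat (xs.map f) n = (PySem.List.pyRepeat xs n).map f := by
  simp [PySem.List.pyRepeat, List.map_flatten]

lemma pyGet?_map {α β : Type} (f : α → β) (xs : List α) (i : Int) :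
    PySem.List.pyGet? (xs.map f) i = (PySem.List.pyGet? xs i).map f := by
  simp [PySem.List.pyGet?]

lemma slice?_map_list {α β : Type} (f : α → β) (xs : List α) (a? b? : Option Int) (st : Int) :
    PySem.List.slice? (xs.map f) a? b? st = (PySem.List.slice? xs a? b? st).map (List.map f) := by
  simp only [PySem.List.slice?, List.length_map]
  split
  · rfl
  · simp [← List.map_filterMap]

lemma algoCore_map {α β : Type} (f : α → β) (xs : List α) (m : Int) :
    algoCore (xs.map f) m = (algoCore xs m).map f := by
  unfold algoCore
  split
  · rw [pyGet?_map, Option.toList_map, pyRepeat_map]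
  · rw [pyRepeat_map, slice?_map_list]
    cases PySem.List.slice? (PySem.List.pyRepeat xs m) none none m <;> simp

-- index-level facts, decided once for each residue in 0..25
set_option maxRecDepth 8000 in
lemma rotIdx_eq : ∀ b ∈ List.range 26,
    List.drop b (List.range 26) ++ List.take b (List.range 26)
      = (List.range 26).map (fun j => (j + b) % 26) := by decide

set_option maxHeartbeats 4000000 in
set_option maxRecDepth 8000 in
lemma algoCore_range : ∀ a ∈ List.range 26,
    algoCore (List.range 26) (a : Int) = (List.range 26).map (fun i => (i * a) % 26) := by decide

-- the alphabet is the image of the index list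
lemma baseL_eq : ("ABCDEFGHIJKLMNOPQRSTUVWXYZ".toList : List Char)
    = (List.range 26).map (fun j => Char.ofNat (65 + j)) := by decide

-- B's cipher list (the port's `cipher` term, literally) in closed form
lemma cipher_closed (mt rt : Nat) (hm : mt < 26) (hr : rt < 26) :
    (if (mt : Int) = 0 then
        PySem.List.pyRepeat (PySem.List.pyGet?
          (PySem.List.slice ("ABCDEFGHIJKLMNOPQRSTUVWXYZ".toList) (some (rt : Int)) none
           ++ PySem.List.slice ("ABCDEFGHIJKLMNOPQRSTUVWXYZ".toList) none (some (rt : Int))) 0).toList 26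
      else (PySem.List.slice? (PySem.List.pyRepeat
          (PySem.List.slice ("ABCDEFGHIJKLMNOPQRSTUVWXYZ".toList) (some (rt : Int)) none
           ++ PySem.List.slice ("ABCDEFGHIJKLMNOPQRSTUVWXYZ".toList) none (some (rt : Int)))
          (mt : Int)) none none (mt : Int)).getD [])
    = (List.range 26).map (fun i => Char.ofNat (65 + (i * mt + rt) % 26)) := by
  rw [show (if (mt : Int) = 0 then
        PySem.List.pyRepeat (PySem.List.pyGet?
          (PySem.List.slice ("ABCDEFGHIJKLMNOPQRSTUVWXYZ".toList) (some (rt : Int)) none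
           ++ PySem.List.slice ("ABCDEFGHIJKLMNOPQRSTUVWXYZ".toList) none (some (rt : Int))) 0).toList 26
      else (PySem.List.slice? (PySem.List.pyRepeat
          (PySem.List.slice ("ABCDEFGHIJKLMNOPQRSTUVWXYZ".toList) (some (rt : Int)) none
           ++ PySem.List.slice ("ABCDEFGHIJKLMNOPQRSTUVWXYZ".toList) none (some (rt : Int)))
          (mt : Int)) none none (mt : Int)).getD [])
      = algoCore
          (PySem.List.slice ("ABCDEFGHIJKLMNOPQRSTUVWXYZ".toList) (some (rt : Int)) none
           ++ PySem.List.slice ("ABCDEFGHIJKLMNOPQRSTUVWXYZ".toList) none (some (rt : Int)))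
          (mt : Int) from rfl]
  rw [PySem.List.slice_from_natCast, PySem.List.slice_to_natCast, baseL_eq,
      ← List.map_drop, ← List.map_take, ← List.map_append,
      rotIdx_eq rt (by simpa using hr), List.map_map, algoCore_map,
      algoCore_range mt (by simpa using hm), List.map_map]
  apply List.map_congr_left
  intro i _
  simp only [Function.comp]
  congr 1
  omega

-- arithmetic: A's cipher residue, reduced through the two residues mt = k1 % 26, rt = k2 % 26
lemma mod_reduce (k1 k2 : Int) (i : Nat) :
    PySem.Int.mod ((i : Int) * k1 + k2) 26
      = ((i * (PySem.Int.mod k1 26).toNat + (PySem.Int.mod k2 26).toNat) % 26 : Nat) := by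
  have e : ∀ a : Int, PySem.Int.mod a 26 = a % 26 := fun a => PySem.Int.mod_eq_emod_of_pos (by norm_num)
  have hm : ((PySem.Int.mod k1 26).toNat : Int) = k1 % 26 := by
    have := PySem.Int.mod_nonneg k1 (b := 26) (by norm_num); rw [e] at this ⊢; omega
  have hr : ((PySem.Int.mod k2 26).toNat : Int) = k2 % 26 := by
    have := PySem.Int.mod_nonneg k2 (b := 26) (by norm_num); rw [e] at this ⊢; omega
  rw [e]
  push_cast
  rw [hm, hr]
  have h3 : ((i : Int) * k1) % 26 = ((i : Int) * (k1 % 26)) % 26 := by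
    conv_lhs => rw [Int.mul_emod]
    conv_rhs => rw [Int.mul_emod, Int.emod_emod_of_dvd _ dvd_rfl]
  omega

-- the canonical enc/dec dicts both programs build (parametrised by the two residues)
def sKey (i : Nat) : String := String.ofList [Char.ofNat (65 + i)]
def sVal (mt rt i : Nat) : String := String.ofList [Char.ofNat (65 + (i * mt + rt) % 26)]

def encDict (mt rt : Nat) : PySem.Dict String String :=
  (List.range 26).foldl (fun d i => d.insert (sKey i) (sVal mt rt i)) PySem.Dict.empty
def decDict (mt rt : Nat) : PySem.Dict String String :=
  (List.range 26).foldl (fun d i => d.insert (sVal mt rt i) (sKey i)) PySem.Dict.empty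

lemma pyChr_key (i : Nat) : pyChr ((i : Int) + 65) = sKey i := by
  have h : ((i : Int) + 65).toNat = 65 + i := by omega
  simp only [pyChr, sKey, h]

lemma pyChr_val (w : Nat) : pyChr (((w : Nat) : Int) + 65) = String.ofList [Char.ofNat (65 + w)] := by
  have h : ((w : Int) + 65).toNat = 65 + w := by omega
  simp only [pyChr, h]

set_option maxHeartbeats 1000000 in
lemma makeDisk_eq (k1 k2 : Int) :
    makeDisk k1 k2
      = ((encDict (PySem.Int.mod k1 26).toNat (PySem.Int.mod k2 26).toNat).items,
         (decDict (PySem.Int.mod k1 26).toNat (PySem.Int.mod k2 26).toNat).items) := by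
  unfold makeDisk encDict decDict
  rw [PySem.List.foldl_prod_mk
      (f := fun (d : PySem.Dict String String) (i : Int) =>
        d.insert (pyChr (i + 65)) (pyChr (PySem.Int.mod (i * k1 + k2) 26 + 65)))
      (g := fun (d : PySem.Dict String String) (i : Int) =>
        d.insert (pyChr (PySem.Int.mod (i * k1 + k2) 26 + 65)) (pyChr (i + 65)))]
  rw [PySem.List.pyRange_zero, List.foldl_map, List.foldl_map]
  have hstep : ∀ i : Nat,
      pyChr (PySem.Int.mod ((i : Int) * k1 + k2) 26 + 65)
        = sVal (PySem.Int.mod k1 26).toNat (PySem.Int.mod k2 26).toNat i := by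
    intro i
    rw [mod_reduce k1 k2 i]
    exact pyChr_val _
  refine congrArg₂ Prod.mk ?_ ?_ <;>
  · refine congrArg PySem.Dict.items ?_
    apply PySem.List.foldl_congr_mem
    intro d i _
    rw [hstep i, pyChr_key i]

set_option maxHeartbeats 1000000 in
lemma makeDisk_alt_eq (k1 k2 : Int) :
    makeDisk_alt k1 k2
      = ((encDict (PySem.Int.mod k1 26).toNat (PySem.Int.mod k2 26).toNat).items,
         (decDict (PySem.Int.mod k1 26).toNat (PySem.Int.mod k2 26).toNat).items) := by
  have hmlt : (PySem.Int.mod k1 26).toNat < 26 := by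
    have := PySem.Int.mod_lt k1 (b := 26) (by norm_num); omega
  have hrlt : (PySem.Int.mod k2 26).toNat < 26 := by
    have := PySem.Int.mod_lt k2 (b := 26) (by norm_num); omega
  have hm : PySem.Int.mod k1 26 = ((PySem.Int.mod k1 26).toNat : Int) := by
    have := PySem.Int.mod_nonneg k1 (b := 26) (by norm_num); omega
  have hr : PySem.Int.mod k2 26 = ((PySem.Int.mod k2 26).toNat : Int) := by
    have := PySem.Int.mod_nonneg k2 (b := 26) (by norm_num); omega
  unfold makeDisk_alt
  simp only []   -- zeta-reduce the lets
  rw [hm, hr]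
  rw [cipher_closed _ _ hmlt hrlt]
  rw [baseL_eq, List.zip_map', List.zip_map', List.map_map, List.map_map]
  -- both components are now Dict.ofList of a map over List.range 26, definitionally the
  -- encDict/decDict folds (Dict.ofList L is L.foldl insert empty, and foldl over a map folds
  -- the composed function)
  rfl

-- ===== VERDICT (by name: the statement is the Claim_ definition above) =====
theorem makeDisk_spec : Claim_equal_makeDisk := by
  intro k1 k2 _
  unfold Spec_makeDisk
  rw [makeDisk_eq, makeDisk_alt_eq]
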